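-- pv_equiv track=rewrite | github.com/DragunWF/Competitive-Programming | CodeWars/python/6_kyu/is_sequence_re_occuring_in_the_list.py | is_reoccuring
-- ===== SOURCE A (Python) =====
-- def is_reoccuring(items: list) -> bool:
--     seen = set()
--     prev = None
--     for item in items:
--         if item != prev:
--             if item in seen:
--                 return True
--             seen.add(item)
--             prev = item
--     return False
-- ===== SOURCE B (Python) =====
-- def is_reoccuring(items: list) -> bool:
--     keys = items[:1] + [y for x, y in zip(items, items[1:]) if y != x]
--     return len(keys) != len(set(keys))
-- ===== Notes on version B (the rewrite author's own statement) =====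
-- stated objective: idiomatic
-- what changed: Replaces the single early-exit scan maintaining a seen-set and prev with two phases: build the run-compressed key list via zip(items, items[1:]) and report a reoccurrence iff the compressed list contains a duplicate (len(keys) != len(set(keys))).
import Mathlib
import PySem

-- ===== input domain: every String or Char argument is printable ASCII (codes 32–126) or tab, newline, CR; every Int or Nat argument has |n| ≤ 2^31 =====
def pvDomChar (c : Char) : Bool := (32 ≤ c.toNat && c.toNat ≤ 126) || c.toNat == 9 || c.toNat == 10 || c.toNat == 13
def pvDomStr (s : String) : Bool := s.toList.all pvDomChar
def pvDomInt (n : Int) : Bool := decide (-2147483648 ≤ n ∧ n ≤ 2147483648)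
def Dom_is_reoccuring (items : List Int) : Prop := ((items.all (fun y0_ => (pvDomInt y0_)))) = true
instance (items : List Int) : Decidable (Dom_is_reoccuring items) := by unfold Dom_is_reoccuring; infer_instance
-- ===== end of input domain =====

-- B two-phase re-implementation: compress runs with zip(items, items[1:]), then duplicate test by set size; return value only (no mutation).

-- ===== PORT A =====
-- 'item != prev' with prev initially None: None compares unequal to every int
def pyNeOpt (x : Int) (prev : Option Int) : Bool :=
  match prev with
  | none => true
  | some p => x != p

def isReoccLoop (items : List Int) (seen : PySem.Set Int) (prev : Option Int) : Bool :=
  match items with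
  | [] => false
  | x :: xs =>
    if pyNeOpt x prev then
      if PySem.Set.contains seen x then true
      else isReoccLoop xs (PySem.Set.add seen x) (some x)
    else isReoccLoop xs seen prev

def is_reoccuring (items : List Int) : Bool :=
  isReoccLoop items PySem.Set.empty none

-- ===== PORT B =====
def is_reoccuring_alt (items : List Int) : Bool :=
  let keys := PySem.List.slice items none (some 1) ++
    (((items.zip (PySem.List.slice items (some 1) none)).filter
        (fun p => p.2 != p.1)).map (fun p => p.2))
  keys.length != (PySem.Set.ofList keys).length

-- ===== PRECONDITION & SPEC =====
def Spec_is_reoccuring (items : List Int) (out : Bool) : Prop := out = is_reoccuring_alt items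
instance (items : List Int) (out : Bool) : Decidable (Spec_is_reoccuring items out) := by unfold Spec_is_reoccuring; infer_instance

-- ===== CLAIM (what is proved, stated in full; the proofs are below) =====
def Claim_equal_is_reoccuring : Prop := ∀ (items : List Int), Dom_is_reoccuring items → Spec_is_reoccuring items (is_reoccuring items)

-- ===== LEMMAS AND PROOFS =====

-- the run-compressed key sequence, given the previous key
def comp (prev : Option Int) (items : List Int) : List Int :=
  match items with
  | [] => []
  | x :: xs =>
    if pyNeOpt x prev then x :: comp (some x) xs else comp prev xs

-- duplicate check over a key list against an accumulating seen-set
def checkDup (ks : List Int) (seen : PySem.Set Int) : Bool :=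
  match ks with
  | [] => false
  | k :: ks => if PySem.Set.contains seen k then true else checkDup ks (PySem.Set.add seen k)

theorem loopA_eq_checkDup (items : List Int) :
    ∀ (seen : PySem.Set Int) (prev : Option Int),
      isReoccLoop items seen prev = checkDup (comp prev items) seen := by
  induction items with
  | nil => intro seen prev; rfl
  | cons x xs ih =>
    intro seen prev
    by_cases h : pyNeOpt x prev = true
    · simp [isReoccLoop, comp, h, checkDup, ih]
    · simp [isReoccLoop, comp, h, ih]

theorem keysB_eq_comp_some (xs : List Int) :
    ∀ (x : Int),
      (((x :: xs).zip xs).filter (fun p => p.2 != p.1)).map (fun p => p.2) = comp (some x) xs := by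
  induction xs with
  | nil => intro x; rfl
  | cons y ys ih =>
    intro x
    rw [List.zip_cons_cons, List.filter_cons]
    by_cases h : y = x
    · subst h
      simp [comp, pyNeOpt, ih y]
    · simp [comp, pyNeOpt, h, ih y]

theorem checkDup_eq (ks : List Int) :
    ∀ (seen : List Int),
      checkDup ks seen = !decide (ks.Nodup ∧ ∀ k ∈ ks, k ∉ seen) := by
  induction ks with
  | nil => intro seen; simp [checkDup]
  | cons k ks ih =>
    intro seen
    by_cases h : k ∈ seen
    · simp [checkDup, h]
    · have hc : PySem.Set.contains seen k = false := by
        simp [PySem.Set.contains, h]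
      rw [checkDup]
      simp only [hc, ih]
      have hiff : (ks.Nodup ∧ ∀ j ∈ ks, j ∉ PySem.Set.add seen k) ↔
          ((k :: ks).Nodup ∧ ∀ j ∈ k :: ks, j ∉ seen) := by
        constructor
        · rintro ⟨hn, hall⟩
          have hk : k ∉ ks := fun hk =>
            (hall k hk) ((PySem.Set.mem_add seen k k).mpr (Or.inr rfl))
          refine ⟨List.nodup_cons.mpr ⟨hk, hn⟩, ?_⟩
          rintro j hj
          rcases List.mem_cons.mp hj with rfl | hj'
          · exact h
          · exact fun hjs => (hall j hj') ((PySem.Set.mem_add seen k j).mpr (Or.inl hjs))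
        · rintro ⟨hn, hall⟩
          rcases List.nodup_cons.mp hn with ⟨hk, hn'⟩
          refine ⟨hn', fun j hj hbad => ?_⟩
          rcases (PySem.Set.mem_add seen k j).mp hbad with hjs | rfl
          · exact hall j (List.mem_cons_of_mem _ hj) hjs
          · exact hk hj
      have hd : decide (ks.Nodup ∧ ∀ j ∈ ks, j ∉ PySem.Set.add seen k) =
          decide ((k :: ks).Nodup ∧ ∀ j ∈ k :: ks, j ∉ seen) := decide_eq_decide.mpr hiff
      simp only [hd]
      simp

theorem foldl_add_length_le (ks : List Int) :
    ∀ (s : List Int), (ks.foldl PySem.Set.add s).length ≤ s.length + ks.length := by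
  induction ks with
  | nil => intro s; simp
  | cons k ks ih =>
    intro s
    by_cases h : k ∈ s
    · rw [List.foldl_cons, PySem.Set.add_of_mem h]
      calc (ks.foldl PySem.Set.add s).length ≤ s.length + ks.length := ih s
        _ ≤ s.length + (k :: ks).length := by
          simp only [List.length_cons]; omega
    · rw [List.foldl_cons, PySem.Set.add_of_not_mem h]
      calc (ks.foldl PySem.Set.add (s ++ [k])).length ≤ (s ++ [k]).length + ks.length := ih _
        _ = s.length + (k :: ks).length := by
          simp only [List.length_append, List.length_cons, List.length_nil]; omega

theorem foldl_add_length_eq_iff (ks : List Int) :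
    ∀ (s : List Int),
      ((ks.foldl PySem.Set.add s).length = s.length + ks.length) ↔
        (ks.Nodup ∧ ∀ k ∈ ks, k ∉ s) := by
  induction ks with
  | nil => intro s; simp
  | cons k ks ih =>
    intro s
    by_cases h : k ∈ s
    · rw [List.foldl_cons, PySem.Set.add_of_mem h]
      have hle := foldl_add_length_le ks s
      simp only [List.length_cons]
      constructor
      · intro hlen; omega
      · rintro ⟨-, hall⟩
        exact absurd h (hall k (by simp))
    · rw [List.foldl_cons, PySem.Set.add_of_not_mem h]
      have hih := ih (s ++ [k])
      simp only [List.length_append, List.length_cons, List.length_nil] at hih ⊢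
      constructor
      · intro hlen
        rcases hih.mp (by omega) with ⟨hn, hall⟩
        have hk : k ∉ ks := fun hk => by simpa using hall k hk
        refine ⟨List.nodup_cons.mpr ⟨hk, hn⟩, ?_⟩
        rintro j hj
        rcases List.mem_cons.mp hj with rfl | hj'
        · exact h
        · have hj2 := hall j hj'
          simp only [List.mem_append, List.mem_singleton] at hj2
          push Not at hj2
          exact hj2.1
      · rintro ⟨hn, hall⟩
        rcases List.nodup_cons.mp hn with ⟨hk, hn'⟩
        have hin : ks.Nodup ∧ ∀ j ∈ ks, j ∉ s ++ [k] := by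
          refine ⟨hn', fun j hj => ?_⟩
          simp only [List.mem_append, List.mem_singleton]
          push Not
          exact ⟨hall j (List.mem_cons_of_mem _ hj), fun hkj => hk (hkj ▸ hj)⟩
        have := hih.mpr hin
        omega

theorem ofList_length_eq_iff (ks : List Int) :
    ((PySem.Set.ofList ks).length = ks.length) ↔ ks.Nodup := by
  rw [PySem.Set.ofList_eq_foldl]
  constructor
  · intro hlen
    exact ((foldl_add_length_eq_iff ks []).mp (by simpa using hlen)).1
  · intro hnd
    have := (foldl_add_length_eq_iff ks []).mpr ⟨hnd, by simp⟩
    simpa using this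

theorem ofList_length_le (ks : List Int) : (PySem.Set.ofList ks).length ≤ ks.length := by
  rw [PySem.Set.ofList_eq_foldl]
  have := foldl_add_length_le ks []
  simpa using this

theorem alt_eq_checkDup (items : List Int) :
    is_reoccuring_alt items = checkDup (comp none items) PySem.Set.empty := by
  cases items with
  | nil => rfl
  | cons x xs =>
    have hkeys : PySem.List.slice (x :: xs) none (some 1) ++
        ((((x :: xs).zip (PySem.List.slice (x :: xs) (some 1) none)).filter
          (fun p => p.2 != p.1)).map (fun p => p.2)) = comp none (x :: xs) := by
      rw [PySem.List.slice_to (x :: xs) (by omega : (0:Int) ≤ 1),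
        PySem.List.slice_from (x :: xs) (by omega : (0:Int) ≤ 1)]
      simp only [Int.toNat_one, List.take_succ_cons, List.take_zero, List.drop_succ_cons,
        List.drop_zero]
      rw [keysB_eq_comp_some xs x]
      rfl
    rw [is_reoccuring_alt]
    simp only [hkeys]
    rw [checkDup_eq _ PySem.Set.empty]
    have hle := ofList_length_le (comp none (x :: xs))
    have hiff := ofList_length_eq_iff (comp none (x :: xs))
    by_cases hnd : (comp none (x :: xs)).Nodup
    · simp [hnd, hiff.mpr hnd]
    · have hne : (PySem.Set.ofList (comp none (x :: xs))).length ≠ (comp none (x :: xs)).length := by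
        intro hEq; exact hnd (hiff.mp hEq)
      simp [hnd, Ne.symm hne]

-- ===== VERDICT (by name: the statement is the Claim_ definition above) =====
theorem is_reoccuring_spec : Claim_equal_is_reoccuring := by
  intro items _
  unfold Spec_is_reoccuring is_reoccuring
  rw [loopA_eq_checkDup items PySem.Set.empty none, alt_eq_checkDup]
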